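-- pv_equiv track=rewrite | github.com/rwinston/coding-competitions | adventofcode/2022/day8.py | part2
-- ===== SOURCE A (Python) =====
-- from functools import reduce
--
-- def countVisible(l, h):
--     count = 0
--     for i in l:
--         if i < h:
--             count +=1
--         else:
--             count += 1
--             break
--     return count
--
-- def part2(matrix) -> int:
--     rows = len(matrix)
--     cols = len(matrix[0])
--
--     maxVisible = 0
--     for i in range(1, rows-1):
--         for j in range(1, cols-1):
--             height = matrix[i][j]
--             down = [matrix[z][j] for z in range(i+1,rows)]
--             right = [matrix[i][z] for z in range(j+1,cols)]
--             left = [matrix[i][z] for z in range(0,j)]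
--             up = [matrix[z][j] for z in range(0,i)]
--
--             f = (lambda y: countVisible(y, height))
--             counts = list(map(f, [up[::-1], down, left[::-1], right]))
--             visible = reduce((lambda x,y: x*y), counts)
--             maxVisible = max(visible, maxVisible)
--
--     return maxVisible
-- ===== SOURCE B (Python) =====
-- def _dists(row):
--     """Viewing distance toward the start of the line for every position,
--     computed in one pass with a monotonic stack of (index, height)."""
--     res = []
--     stack = []
--     for j, h in enumerate(row):
--         while stack and stack[-1][1] < h:
--             stack.pop()
--         res.append(j - stack[-1][0] if stack else j)
--         stack.append((j, h))
--     return res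
--
-- def part2(matrix) -> int:
--     rows = len(matrix)
--     cols = len(matrix[0])
--     if rows < 3 or cols < 3:
--         return 0  # no interior cell, every scenic score is empty
--     L = [_dists(r) for r in matrix]
--     R = [_dists(r[::-1])[::-1] for r in matrix]
--     T = [[row[j] for row in matrix] for j in range(cols)]
--     U = [_dists(c) for c in T]
--     D = [_dists(c[::-1])[::-1] for c in T]
--     best = 0
--     for i in range(1, rows - 1):
--         for j in range(1, cols - 1):
--             best = max(best, L[i][j] * R[i][j] * U[j][i] * D[j][i])
--     return best
-- ===== Notes on version B (the rewrite author's own statement) =====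
-- stated objective: faster
-- what changed: Replaces the per-cell rescans in all four directions with per-row/per-column monotonic-stack passes that precompute every viewing distance once, then takes the max of products over interior cells.
-- outside the precondition, e.g. on part2([[1, 1, 1], [1, 2, 1, 9], [1, 1, 1]]): A returns 1, B returns 2; on part2([[1, 1, 1], [1, 2], [1, 1, 1]]): A raises IndexError, B raises IndexError
import Mathlib
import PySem

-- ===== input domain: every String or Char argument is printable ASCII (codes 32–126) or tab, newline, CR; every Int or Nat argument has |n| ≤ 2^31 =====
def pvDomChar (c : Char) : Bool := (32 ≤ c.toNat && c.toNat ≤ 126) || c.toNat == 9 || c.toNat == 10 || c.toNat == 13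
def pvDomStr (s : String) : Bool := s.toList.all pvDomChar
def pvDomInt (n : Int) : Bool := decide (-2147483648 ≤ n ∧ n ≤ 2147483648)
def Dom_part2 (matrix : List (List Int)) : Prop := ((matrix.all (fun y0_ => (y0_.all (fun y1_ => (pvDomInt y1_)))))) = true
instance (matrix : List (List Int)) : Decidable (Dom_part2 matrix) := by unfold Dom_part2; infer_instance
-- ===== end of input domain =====

-- B replaces A's per-cell rescans with one monotonic-stack pass per row/column (O(R*C) vs O(R*C*(R+C)));
-- a timing run measured B faster on the large inputs.

-- shared indexing helper: matrix[i][j] (total form; Pre_ keeps every access in range)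
def gI (m : List (List Int)) (i j : Int) : Int :=
  PySem.List.pyGetD (PySem.List.pyGetD m i []) j 0

-- ===== PORT A =====
def countVisible : List Int → Int → Int
  | [], _ => 0
  | i :: t, h => if i < h then 1 + countVisible t h else 1

-- functools.reduce(mul) with no initial value ([] raises TypeError; A's list always has 4 elements)
def pyReduceMul : List Int → Int
  | [] => 0
  | x :: t => t.foldl (· * ·) x

def part2 (matrix : List (List Int)) : Int :=
  let rows : Int := matrix.length
  let cols : Int := (PySem.List.pyGetD matrix 0 []).length
  (PySem.List.pyRange 1 (rows - 1) 1).foldl (fun maxVisible i =>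
    (PySem.List.pyRange 1 (cols - 1) 1).foldl (fun maxVisible j =>
      let height := gI matrix i j
      let down := (PySem.List.pyRange (i + 1) rows 1).map (fun z => gI matrix z j)
      let right := (PySem.List.pyRange (j + 1) cols 1).map (fun z => gI matrix i z)
      let left := (PySem.List.pyRange 0 j 1).map (fun z => gI matrix i z)
      let up := (PySem.List.pyRange 0 i 1).map (fun z => gI matrix z j)
      let counts := [up.reverse, down, left.reverse, right].map (fun y => countVisible y height)
      let visible := pyReduceMul counts
      max visible maxVisible) maxVisible) 0

-- ===== PORT B =====
-- the 'while stack and stack[-1][1] < h: stack.pop()' loop (stack top = list head)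
def popS (h : Int) : List (Nat × Int) → List (Nat × Int)
  | [] => []
  | (k, hk) :: t => if hk < h then popS h t else (k, hk) :: t

-- 'j - stack[-1][0] if stack else j'
def ans (j : Nat) : List (Nat × Int) → Int
  | [] => (j : Int)
  | (k, _) :: _ => (j : Int) - (k : Int)

def distsGo : List Int → Nat → List (Nat × Int) → List Int
  | [], _, _ => []
  | h :: t, j, st =>
    let st' := popS h st
    ans j st' :: distsGo t (j + 1) ((j, h) :: st')

def dists (row : List Int) : List Int := distsGo row 0 []

def part2_alt (matrix : List (List Int)) : Int :=
  let rows : Int := matrix.length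
  let cols : Int := (PySem.List.pyGetD matrix 0 []).length
  if rows < 3 ∨ cols < 3 then 0 else
  let L := matrix.map dists
  let R := matrix.map (fun r => (dists r.reverse).reverse)
  let T := (PySem.List.pyRange 0 cols 1).map (fun j => matrix.map (fun row => PySem.List.pyGetD row j 0))
  let U := T.map dists
  let D := T.map (fun c => (dists c.reverse).reverse)
  (PySem.List.pyRange 1 (rows - 1) 1).foldl (fun best i =>
    (PySem.List.pyRange 1 (cols - 1) 1).foldl (fun best j =>
      max best (gI L i j * gI R i j * gI U j i * gI D j i)) best) 0

-- ===== PRECONDITION & SPEC =====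
-- Pre_ excludes the empty matrix (A raises IndexError on len(matrix[0])) and, when the grid has interior
-- cells (at least 3 rows and 3 columns), ragged matrices: there A either raises IndexError (a row shorter
-- than the first) or silently ignores the trailing entries of over-long rows — an artefact of bounding
-- every scan by len(matrix[0]).
def Pre_part2 (matrix : List (List Int)) : Prop :=
  matrix ≠ [] ∧ (3 ≤ matrix.length → 3 ≤ (matrix.headD []).length →
    ∀ r ∈ matrix, r.length = (matrix.headD []).length)
instance (matrix : List (List Int)) : Decidable (Pre_part2 matrix) := by unfold Pre_part2; infer_instance

def pvWitness_part2 : List (List Int) := [[3, 0, 3], [2, 5, 1], [6, 4, 2]]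

def Spec_part2 (matrix : List (List Int)) (out : Int) : Prop := out = part2_alt matrix
instance (matrix : List (List Int)) (out : Int) : Decidable (Spec_part2 matrix out) := by unfold Spec_part2; infer_instance

-- ===== CLAIM (what is proved, stated in full; the proofs are below) =====
def Claim_equal_part2 : Prop := ∀ (matrix : List (List Int)), Dom_part2 matrix → Pre_part2 matrix → Spec_part2 matrix (part2 matrix)

-- ===== LEMMAS AND PROOFS =====

-- popping with a lower threshold first is absorbed by a higher one
lemma popS_popS (h hj : Int) (hle : hj ≤ h) (st : List (Nat × Int)) :
    popS h (popS hj st) = popS h st := by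
  induction st with
  | nil => rfl
  | cons p t ih =>
    obtain ⟨k, hk⟩ := p
    by_cases hlt : hk < hj
    · simp [popS, hlt, ih, if_pos (lt_of_lt_of_le hlt hle)]
    · simp [popS, hlt]

lemma ans_succ (j : Nat) (st : List (Nat × Int)) : ans (j + 1) st = 1 + ans j st := by
  cases st with
  | nil => simp [ans]; ring
  | cons p t => obtain ⟨k, hk⟩ := p; simp [ans]; ring

-- the stack invariant: querying the stack answers exactly what scanning the reversed prefix answers
def StInv (revPre : List Int) (j : Nat) (st : List (Nat × Int)) : Prop :=
  ∀ h : Int, ans j (popS h st) = countVisible revPre h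

lemma inv_nil : StInv [] 0 [] := by intro h; simp [ans, popS, countVisible]

lemma inv_step {revPre : List Int} {j : Nat} {st : List (Nat × Int)} (hj : Int)
    (hinv : StInv revPre j st) : StInv (hj :: revPre) (j + 1) ((j, hj) :: popS hj st) := by
  intro h
  by_cases hlt : hj < h
  · have : popS h ((j, hj) :: popS hj st) = popS h st := by
      simp [popS, if_pos hlt, popS_popS h hj (le_of_lt hlt)]
    rw [this, ans_succ, hinv h]
    simp [countVisible, if_pos hlt]
  · have : popS h ((j, hj) :: popS hj st) = (j, hj) :: popS hj st := by
      simp [popS, if_neg hlt]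
    rw [this]
    simp [ans, countVisible, if_neg hlt]

-- the spec-side recursion: left viewing distance of each element against its reversed prefix
def specGo : List Int → List Int → List Int
  | [], _ => []
  | h :: t, revPre => countVisible revPre h :: specGo t (h :: revPre)

lemma distsGo_eq_specGo : ∀ (l revPre : List Int) (j : Nat) (st : List (Nat × Int)),
    StInv revPre j st → distsGo l j st = specGo l revPre := by
  intro l
  induction l with
  | nil => intros; rfl
  | cons h t ih =>
    intro revPre j st hinv
    simp only [distsGo, specGo, List.cons.injEq]
    exact ⟨hinv h, ih _ _ _ (inv_step h hinv)⟩

lemma dists_eq_specGo (row : List Int) : dists row = specGo row [] :=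
  distsGo_eq_specGo row [] 0 [] inv_nil

lemma length_specGo : ∀ (l revPre : List Int), (specGo l revPre).length = l.length := by
  intro l; induction l with
  | nil => intro _; rfl
  | cons h t ih => intro revPre; simp [specGo, ih]

lemma length_dists (row : List Int) : (dists row).length = row.length := by
  rw [dists_eq_specGo]; exact length_specGo row []

lemma specGo_getD : ∀ (row revPre : List Int) (j : Nat), j < row.length →
    (specGo row revPre).getD j 0 =
      countVisible ((row.take j).reverse ++ revPre) (row.getD j 0) := by
  intro row
  induction row with
  | nil => intro _ j hj; simp at hj
  | cons h t ih =>
    intro revPre j hj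
    cases j with
    | zero => simp [specGo]
    | succ j =>
      simp only [specGo, List.getD_cons_succ, List.take_succ_cons, List.reverse_cons,
        List.append_assoc, List.cons_append, List.nil_append]
      exact ih (h :: revPre) j (by simpa using hj)

lemma dists_getD (row : List Int) (j : Nat) (hj : j < row.length) :
    (dists row).getD j 0 = countVisible ((row.take j).reverse) (row.getD j 0) := by
  rw [dists_eq_specGo, specGo_getD row [] j hj, List.append_nil]

lemma dists_rev_getD (row : List Int) (j : Nat) (hj : j < row.length) :
    ((dists row.reverse).reverse).getD j 0 = countVisible (row.drop (j + 1)) (row.getD j 0) := by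
  have hlen : (dists row.reverse).length = row.length := by
    rw [length_dists, List.length_reverse]
  have hj' : row.length - 1 - j < row.length := by omega
  have h1 : ((dists row.reverse).reverse).getD j 0 = (dists row.reverse).getD (row.length - 1 - j) 0 := by
    rw [List.getD_eq_getElem _ _ (by rw [List.length_reverse, hlen]; exact hj),
        List.getD_eq_getElem _ _ (by rw [hlen]; exact hj')]
    rw [List.getElem_reverse]
    congr 1
    omega
  rw [h1, dists_getD _ _ (by rw [List.length_reverse]; exact hj')]
  have h2 : row.reverse.getD (row.length - 1 - j) 0 = row.getD j 0 := by
    rw [List.getD_eq_getElem _ _ (by rw [List.length_reverse]; exact hj'),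
        List.getD_eq_getElem _ _ hj, List.getElem_reverse]
    congr 1
    omega
  have h3 : (row.reverse.take (row.length - 1 - j)).reverse = row.drop (j + 1) := by
    rw [List.take_reverse, List.reverse_reverse]
    congr 1
    omega
  rw [h2, h3]

-- the j-th column of the matrix
def colList (m : List (List Int)) (j : Int) : List Int :=
  m.map (fun row => PySem.List.pyGetD row j 0)

lemma getD_zero_headD (m : List (List Int)) : m.getD 0 [] = m.headD [] := by
  cases m <;> simp

lemma colJ_getD (m : List (List Int)) (b k : Nat) (hk : k < m.length) :
    (m.map (fun row => row.getD b 0)).getD k 0 = (m.getD k []).getD b 0 := by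
  rw [List.getD_eq_getElem _ _ (by simpa using hk), List.getElem_map, List.getD_eq_getElem m _ hk]

lemma mapRange_take (xs : List Int) (f : Int → Int) (n : Nat) (hn : n ≤ xs.length)
    (hf : ∀ k : Nat, k < n → f k = xs.getD k 0) :
    (PySem.List.pyRange 0 (n : Int) 1).map f = xs.take n := by
  apply List.ext_getElem
  · simp [PySem.List.length_pyRange_one]
    omega
  · intro k h1 h2
    simp only [List.getElem_map, PySem.List.getElem_pyRange_one, zero_add, List.getElem_take]
    have hk : k < n := by
      simp [PySem.List.length_pyRange_one] at h1
      omega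
    rw [hf k hk, List.getD_eq_getElem _ _ (by omega)]

lemma mapRange_drop (xs : List Int) (f : Int → Int) (s : Nat) (hs : s ≤ xs.length)
    (hf : ∀ k : Nat, s ≤ k → k < xs.length → f k = xs.getD k 0) :
    (PySem.List.pyRange (s : Int) (xs.length : Int) 1).map f = xs.drop s := by
  apply List.ext_getElem
  · simp only [List.length_map, PySem.List.length_pyRange_one, List.length_drop]
    omega
  · intro k h1 h2
    simp only [List.getElem_map, PySem.List.getElem_pyRange_one, List.getElem_drop]
    have hk : k < xs.length - s := by
      simp [PySem.List.length_pyRange_one] at h1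
      omega
    have : ((s : Int) + (k : Int)) = ((s + k : Nat) : Int) := by push_cast; ring
    rw [this, hf (s + k) (by omega) (by omega), List.getD_eq_getElem _ _ (by omega)]

lemma B_L (m : List (List Int)) (a b : Nat) (ha : a < m.length) (hb : b < (m.getD a []).length) :
    gI (m.map dists) (a : Int) (b : Int) =
      countVisible ((m.getD a []).take b).reverse ((m.getD a []).getD b 0) := by
  simp only [gI, PySem.List.pyGetD_natCast]
  have hma : (m.map dists).getD a [] = dists (m.getD a []) := by
    rw [List.getD_eq_getElem _ _ (by simpa using ha), List.getElem_map, List.getD_eq_getElem m _ ha]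
  rw [hma, dists_getD _ _ hb]

lemma B_R (m : List (List Int)) (a b : Nat) (ha : a < m.length) (hb : b < (m.getD a []).length) :
    gI (m.map (fun r => (dists r.reverse).reverse)) (a : Int) (b : Int) =
      countVisible ((m.getD a []).drop (b + 1)) ((m.getD a []).getD b 0) := by
  simp only [gI, PySem.List.pyGetD_natCast]
  have hma : (m.map (fun r => (dists r.reverse).reverse)).getD a [] =
      (dists (m.getD a []).reverse).reverse := by
    rw [List.getD_eq_getElem _ _ (by simpa using ha), List.getElem_map, List.getD_eq_getElem m _ ha]
  rw [hma, dists_rev_getD _ _ hb]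

lemma T_getElem (m : List (List Int)) (C b : Nat)
    (h : b < ((PySem.List.pyRange 0 (C : Int) 1).map
        (fun jj => m.map (fun row => PySem.List.pyGetD row jj 0))).length) :
    ((PySem.List.pyRange 0 (C : Int) 1).map
        (fun jj => m.map (fun row => PySem.List.pyGetD row jj 0)))[b] =
      m.map (fun row => row.getD b 0) := by
  simp [PySem.List.getElem_pyRange_one]

lemma B_U (m : List (List Int)) (C a b : Nat) (hb : b < C) (ha : a < m.length) :
    gI ((((PySem.List.pyRange 0 (C : Int) 1).map
        (fun jj => m.map (fun row => PySem.List.pyGetD row jj 0))).map dists)) (b : Int) (a : Int) =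
      countVisible (((m.map (fun row => row.getD b 0)).take a).reverse)
        ((m.map (fun row => row.getD b 0)).getD a 0) := by
  simp only [gI, PySem.List.pyGetD_natCast]
  have hlen : b < ((PySem.List.pyRange 0 (C : Int) 1).map
      (fun jj => m.map (fun row => PySem.List.pyGetD row jj 0))).length := by
    simp [PySem.List.length_pyRange_one]
    omega
  have hT : (((PySem.List.pyRange 0 (C : Int) 1).map
      (fun jj => m.map (fun row => PySem.List.pyGetD row jj 0))).map dists).getD b [] =
      dists (m.map (fun row => row.getD b 0)) := by
    rw [List.getD_eq_getElem _ _ (by simpa using hlen), List.getElem_map, T_getElem m C b hlen]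
  rw [hT, dists_getD _ _ (by simpa using ha)]

lemma B_D (m : List (List Int)) (C a b : Nat) (hb : b < C) (ha : a < m.length) :
    gI ((((PySem.List.pyRange 0 (C : Int) 1).map
        (fun jj => m.map (fun row => PySem.List.pyGetD row jj 0))).map
          (fun c => (dists c.reverse).reverse))) (b : Int) (a : Int) =
      countVisible ((m.map (fun row => row.getD b 0)).drop (a + 1))
        ((m.map (fun row => row.getD b 0)).getD a 0) := by
  simp only [gI, PySem.List.pyGetD_natCast]
  have hlen : b < ((PySem.List.pyRange 0 (C : Int) 1).map
      (fun jj => m.map (fun row => PySem.List.pyGetD row jj 0))).length := by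
    simp [PySem.List.length_pyRange_one]
    omega
  have hT : (((PySem.List.pyRange 0 (C : Int) 1).map
      (fun jj => m.map (fun row => PySem.List.pyGetD row jj 0))).map
        (fun c => (dists c.reverse).reverse)).getD b [] =
      (dists (m.map (fun row => row.getD b 0)).reverse).reverse := by
    rw [List.getD_eq_getElem _ _ (by simpa using hlen), List.getElem_map, T_getElem m C b hlen]
  rw [hT, dists_rev_getD _ _ (by simpa using ha)]

lemma foldl_acc_const (l : List Int) (init : Int) :
    l.foldl (fun acc _ => acc) init = init := by
  induction l generalizing init with
  | nil => rfl
  | cons x t ih => simp [List.foldl, ih]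

lemma part2_eq (m : List (List Int)) (hpre : Pre_part2 m) : part2 m = part2_alt m := by
  obtain ⟨hne, hrect0⟩ := hpre
  by_cases hdeg : ((m.length : Int) < 3 ∨ (((PySem.List.pyGetD m 0 []).length : Int)) < 3)
  · -- no interior cell: A's loops run over empty ranges, B returns 0 up front
    simp only [part2, part2_alt, if_pos hdeg]
    rcases hdeg with hr | hc
    · rw [show PySem.List.pyRange 1 ((m.length : Int) - 1) 1 = [] from
        PySem.List.pyRange_one_eq_nil (by omega)]
      rfl
    · have hcnil : PySem.List.pyRange 1 (((PySem.List.pyGetD m 0 []).length : Int) - 1) 1 = [] :=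
        PySem.List.pyRange_one_eq_nil (by omega)
      simp only [hcnil, List.foldl_nil]
      exact foldl_acc_const _ 0
  · have hrect : ∀ r ∈ m, r.length = (PySem.List.pyGetD m 0 []).length := by
      intro r hr
      rw [PySem.List.pyGetD_zero, getD_zero_headD]
      apply hrect0 _ _ r hr
      · omega
      · have := getD_zero_headD m
        rw [PySem.List.pyGetD_zero] at hdeg
        rw [this] at hdeg
        omega
    simp only [part2, part2_alt, if_neg hdeg]
    apply PySem.List.foldl_congr_mem
    intro acc i hi
    apply PySem.List.foldl_congr_mem
    intro acc2 j hj
    rw [PySem.List.mem_pyRange_one] at hi hj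
    obtain ⟨a, rfl⟩ := Int.eq_ofNat_of_zero_le (by omega : (0 : Int) ≤ i)
    obtain ⟨b, rfl⟩ := Int.eq_ofNat_of_zero_le (by omega : (0 : Int) ≤ j)
    set C := (PySem.List.pyGetD m 0 []).length with hC
    have ha : a + 1 < m.length := by omega
    have hb : b + 1 < C := by omega
    set rowI := m.getD a [] with hrowI
    have hrowlen : rowI.length = C := by
      rw [hrowI, List.getD_eq_getElem m _ (by omega)]
      exact hrect _ (List.getElem_mem _)
    set colJ := m.map (fun row => row.getD b 0) with hcolJ
    have hcollen : colJ.length = m.length := by rw [hcolJ, List.length_map]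
    -- A's four comprehensions are take/drop of the row / the column
    have hup : (PySem.List.pyRange 0 ((a : Nat) : Int) 1).map (fun z => gI m z (b : Int)) =
        colJ.take a := by
      apply mapRange_take _ _ _ (by omega)
      intro k hk
      simp only [gI, PySem.List.pyGetD_natCast, hcolJ]
      rw [colJ_getD m b k (by omega)]
    have hdown : (PySem.List.pyRange ((a : Int) + 1) ((m.length : Nat) : Int) 1).map
        (fun z => gI m z (b : Int)) = colJ.drop (a + 1) := by
      have h1 : ((a : Int) + 1) = (((a + 1 : Nat)) : Int) := by push_cast; ring
      have h2 : ((m.length : Nat) : Int) = ((colJ.length : Nat) : Int) := by rw [hcollen]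
      rw [h1, h2]
      apply mapRange_drop _ _ _ (by omega)
      intro k _ hk
      simp only [gI, PySem.List.pyGetD_natCast, hcolJ]
      rw [colJ_getD m b k (by omega)]
    have hleft : (PySem.List.pyRange 0 ((b : Nat) : Int) 1).map (fun z => gI m (a : Int) z) =
        rowI.take b := by
      apply mapRange_take _ _ _ (by omega)
      intro k hk
      simp only [gI, PySem.List.pyGetD_natCast, hrowI]
    have hright : (PySem.List.pyRange ((b : Int) + 1) ((C : Nat) : Int) 1).map
        (fun z => gI m (a : Int) z) = rowI.drop (b + 1) := by
      have h1 : ((b : Int) + 1) = (((b + 1 : Nat)) : Int) := by push_cast; ring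
      have h2 : ((C : Nat) : Int) = ((rowI.length : Nat) : Int) := by rw [hrowlen]
      rw [h1, h2]
      apply mapRange_drop _ _ _ (by omega)
      intro k _ hk
      simp only [gI, PySem.List.pyGetD_natCast, hrowI]
    rw [hup, hdown, hleft, hright,
        B_L m a b (by omega) (by rw [← hrowI, hrowlen]; omega),
        B_R m a b (by omega) (by rw [← hrowI, hrowlen]; omega),
        B_U m C a b (by omega) (by omega),
        B_D m C a b (by omega) (by omega), ← hrowI, ← hcolJ]
    have hcj : colJ.getD a 0 = rowI.getD b 0 := by
      simp only [hcolJ, hrowI]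
      rw [colJ_getD m b a (by omega)]
    have hH : gI m ((a : Nat) : Int) ((b : Nat) : Int) = rowI.getD b 0 := by
      simp only [gI, PySem.List.pyGetD_natCast, hrowI]
    rw [hcj, hH]
    simp only [List.map, pyReduceMul, List.foldl]
    rw [max_comm]
    congr 1
    ring

-- ===== VERDICT (by name: the statement is the Claim_ definition above) =====
theorem part2_spec : Claim_equal_part2 := by
  intro matrix _ hpre
  unfold Spec_part2
  exact part2_eq matrix hpre
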